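-- pv_equiv track=rewrite | github.com/rachelnwood/Advent-of-Code | 2025/day_7/part01_solution.py | beam_split_count
-- ===== SOURCE A (Python) =====
-- def splitter_list(lines: list[str], y: int) -> list[int]:
--     line = lines[y]
--     all_splitters = [index for index, char in enumerate(line) if char == "^"]
--
--     return all_splitters
--
-- def beam_tracker(splitter_locations: list[int], previous_beam_set: set[int]) -> set[int]:
--     result = set()
--     for x in splitter_locations:
--         if x in previous_beam_set:
--             result.add(x-1)
--             result.add(x+1)
--
--     return result
--
-- def beam_split_count(lines: list[str]) -> int:
--     total = 0
--     beam_tracker_above = set(index for index, char in enumerate(lines[0]) if char == "S")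
--
--     for y in range(2, len(lines), 2): # skipping every other line
--         splitter_locations = splitter_list(lines, y)
--
--         for x in splitter_locations:
--             if x in beam_tracker_above:
--                 total += 1
--
--         beam_tracker_current_row = beam_tracker(splitter_locations, beam_tracker_above)
--
--         for x in beam_tracker_above:
--             if x not in splitter_locations:
--                 beam_tracker_current_row.add(x)
--
--         beam_tracker_above = beam_tracker_current_row
--
--     return total
-- ===== SOURCE B (Python) =====
-- def beam_split_count(lines: list[str]) -> int:
--     # Single beam-driven pass per row: walk the current beam set once; a beam on a
--     # splitter counts a hit and forks to x-1/x+1, otherwise it passes through.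
--     beams = {i for i, ch in enumerate(lines[0]) if ch == "S"}
--     total = 0
--     for y in range(2, len(lines), 2):
--         splitters = {i for i, ch in enumerate(lines[y]) if ch == "^"}
--         nxt = set()
--         for x in beams:
--             if x in splitters:
--                 total += 1
--                 nxt.add(x - 1)
--                 nxt.add(x + 1)
--             else:
--                 nxt.add(x)
--         beams = nxt
--     return total
-- ===== Notes on version B (the rewrite author's own statement) =====
-- stated objective: simpler
-- what changed: Each row is processed in ONE pass over the current beam set (hit: count and fork to x-1/x+1; miss: pass through) instead of A's three separate passes (count splitters hit, build forks from splitters, re-add passthrough beams).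
import Mathlib
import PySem

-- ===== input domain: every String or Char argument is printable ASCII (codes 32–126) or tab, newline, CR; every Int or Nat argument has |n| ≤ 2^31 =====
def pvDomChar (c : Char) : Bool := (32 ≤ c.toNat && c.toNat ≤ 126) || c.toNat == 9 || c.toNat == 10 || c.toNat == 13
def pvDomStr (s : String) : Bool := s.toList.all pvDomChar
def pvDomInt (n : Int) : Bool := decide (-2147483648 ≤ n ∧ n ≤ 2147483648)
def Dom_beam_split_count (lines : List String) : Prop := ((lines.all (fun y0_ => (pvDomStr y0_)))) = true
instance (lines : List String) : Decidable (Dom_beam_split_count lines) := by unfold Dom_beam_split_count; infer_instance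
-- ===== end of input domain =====

-- B replaces A's three passes per row by one pass over the current beam set (same return value; nothing mutated).

-- ===== PORT A =====
-- y is drawn from range(2, len(lines), 2), so lines[y] is always in range: pyGetD with default "" is exact there.
def splitter_list (lines : List String) (y : Int) : List Int :=
  let line := PySem.List.pyGetD lines y ""
  ((PySem.List.enumerate line.toList).filter (fun p => p.2 == '^')).map (fun p => p.1)

def beam_tracker (splitter_locations : List Int) (previous_beam_set : PySem.Set Int) : PySem.Set Int :=
  splitter_locations.foldl
    (fun result x =>
      if previous_beam_set.contains x then
        PySem.Set.add (PySem.Set.add result (x - 1)) (x + 1)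
      else result)
    PySem.Set.empty

def beam_split_count (lines : List String) : Int :=
  let beam0 : PySem.Set Int :=
    PySem.Set.ofList
      (((PySem.List.enumerate (PySem.List.pyGetD lines 0 "").toList).filter
          (fun p => p.2 == 'S')).map (fun p => p.1))
  let st := (PySem.List.pyRange 2 (lines.length : Int) 2).foldl
    (fun (st : Int × PySem.Set Int) y =>
      let splitter_locations := splitter_list lines y
      let total := splitter_locations.foldl
        (fun t x => if st.2.contains x then t + 1 else t) st.1
      let cur := beam_tracker splitter_locations st.2
      let cur := st.2.foldl
        (fun c x => if splitter_locations.contains x then c else PySem.Set.add c x) cur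
      (total, cur))
    (0, beam0)
  st.1

-- ===== PORT B =====
def beam_split_count_alt (lines : List String) : Int :=
  let beams0 : PySem.Set Int :=
    PySem.Set.ofList
      (((PySem.List.enumerate (PySem.List.pyGetD lines 0 "").toList).filter
          (fun p => p.2 == 'S')).map (fun p => p.1))
  let st := (PySem.List.pyRange 2 (lines.length : Int) 2).foldl
    (fun (st : Int × PySem.Set Int) y =>
      let splitters : PySem.Set Int :=
        PySem.Set.ofList
          (((PySem.List.enumerate (PySem.List.pyGetD lines y "").toList).filter
              (fun p => p.2 == '^')).map (fun p => p.1))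
      st.2.foldl
        (fun (acc : Int × PySem.Set Int) x =>
          if splitters.contains x then
            (acc.1 + 1, PySem.Set.add (PySem.Set.add acc.2 (x - 1)) (x + 1))
          else (acc.1, PySem.Set.add acc.2 x))
        (st.1, PySem.Set.empty))
    (0, beams0)
  st.1

-- ===== PRECONDITION & SPEC =====
-- Pre_ excludes only the empty list, on which A raises IndexError at lines[0].
def Pre_beam_split_count (lines : List String) : Prop := lines ≠ []
instance (lines : List String) : Decidable (Pre_beam_split_count lines) := by
  unfold Pre_beam_split_count; infer_instance
def pvWitness_beam_split_count : List String := ["S.S", "...", ".^."]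

def Spec_beam_split_count (lines : List String) (out : Int) : Prop := out = beam_split_count_alt lines
instance (lines : List String) (out : Int) : Decidable (Spec_beam_split_count lines out) := by unfold Spec_beam_split_count; infer_instance

-- ===== CLAIM (what is proved, stated in full; the proofs are below) =====
def Claim_equal_beam_split_count : Prop := ∀ (lines : List String), Dom_beam_split_count lines → Pre_beam_split_count lines → Spec_beam_split_count lines (beam_split_count lines)

-- ===== LEMMAS AND PROOFS =====

-- the column-index list of a row has no duplicates (indices come from enumerate)
theorem nodup_idx_list (cs : List Char) (p : Int × Char → Bool) :
    (((PySem.List.enumerate cs).filter p).map (fun q => q.1)).Nodup := by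
  have h : (((PySem.List.enumerate cs).filter p).map (fun q => q.1)).Sublist
      ((PySem.List.enumerate cs).map (fun q => q.1)) := List.filter_sublist.map _
  rw [PySem.List.map_fst_enumerate] at h
  exact h.nodup (PySem.List.nodup_pyRange_one _ _)

-- A's fork loop (beam_tracker body): membership characterisation
theorem mem_fork (spl : List Int) (prev : PySem.Set Int) (r : PySem.Set Int) (z : Int) :
    z ∈ spl.foldl (fun result x => if prev.contains x then
        PySem.Set.add (PySem.Set.add result (x - 1)) (x + 1) else result) r
      ↔ z ∈ r ∨ ∃ x ∈ spl, x ∈ prev ∧ (z = x - 1 ∨ z = x + 1) := by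
  induction spl generalizing r with
  | nil => simp
  | cons a l ih =>
    simp only [List.foldl_cons, ih, List.mem_cons]
    by_cases h : a ∈ prev
    · simp [h, PySem.Set.mem_add, or_assoc]
    · simp [h]

theorem nodup_fork (spl : List Int) (prev : PySem.Set Int) (r : PySem.Set Int)
    (hr : r.Nodup) :
    (spl.foldl (fun result x => if prev.contains x then
        PySem.Set.add (PySem.Set.add result (x - 1)) (x + 1) else result) r).Nodup := by
  induction spl generalizing r with
  | nil => exact hr
  | cons a l ih =>
    simp only [List.foldl_cons]
    split
    · exact ih _ (PySem.Set.nodup_add _ _ (PySem.Set.nodup_add _ _ hr))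
    · exact ih _ hr

-- A's passthrough loop
theorem mem_pass (above : List Int) (spl : List Int) (r : PySem.Set Int) (z : Int) :
    z ∈ above.foldl (fun c x => if spl.contains x then c else PySem.Set.add c x) r
      ↔ z ∈ r ∨ (z ∈ above ∧ z ∉ spl) := by
  induction above generalizing r with
  | nil => simp
  | cons a l ih =>
    simp only [List.foldl_cons, ih, List.mem_cons]
    by_cases h : a ∈ spl
    · simp [h]
      constructor
      · tauto
      · rintro (hz | ⟨(rfl | hz), hns⟩) <;> tauto
    · simp [h, PySem.Set.mem_add]
      constructor
      · rintro (⟨hz | rfl⟩ | hz) <;> tauto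
      · rintro (hz | ⟨(rfl | hz), hns⟩) <;> tauto

theorem nodup_pass (above : List Int) (spl : List Int) (r : PySem.Set Int)
    (hr : r.Nodup) :
    (above.foldl (fun c x => if spl.contains x then c else PySem.Set.add c x) r).Nodup := by
  induction above generalizing r with
  | nil => exact hr
  | cons a l ih =>
    simp only [List.foldl_cons]
    split
    · exact ih _ hr
    · exact ih _ (PySem.Set.nodup_add _ _ hr)

-- B's single beam-driven pass: total, membership and nodup of the pair-state foldl
theorem foldlB_spec (spl : PySem.Set Int) (l : List Int) (p : Int × PySem.Set Int) :
    (l.foldl (fun (acc : Int × PySem.Set Int) x => if spl.contains x then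
        (acc.1 + 1, PySem.Set.add (PySem.Set.add acc.2 (x - 1)) (x + 1))
      else (acc.1, PySem.Set.add acc.2 x)) p).1
        = p.1 + (l.countP (fun x => spl.contains x) : Int)
    ∧ (∀ z, z ∈ (l.foldl (fun (acc : Int × PySem.Set Int) x => if spl.contains x then
        (acc.1 + 1, PySem.Set.add (PySem.Set.add acc.2 (x - 1)) (x + 1))
      else (acc.1, PySem.Set.add acc.2 x)) p).2
        ↔ z ∈ p.2 ∨ ∃ x ∈ l, (x ∈ spl ∧ (z = x - 1 ∨ z = x + 1)) ∨ (x ∉ spl ∧ z = x))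
    ∧ (p.2.Nodup → (l.foldl (fun (acc : Int × PySem.Set Int) x => if spl.contains x then
        (acc.1 + 1, PySem.Set.add (PySem.Set.add acc.2 (x - 1)) (x + 1))
      else (acc.1, PySem.Set.add acc.2 x)) p).2.Nodup) := by
  induction l generalizing p with
  | nil => simp
  | cons a l ih =>
    simp only [List.foldl_cons, List.countP_cons, List.mem_cons]
    by_cases h : a ∈ spl
    · have hc : spl.contains a = true := (PySem.Set.contains_iff _ _).mpr h
      obtain ⟨ih1, ih2, ih3⟩ := ih (p.1 + 1, PySem.Set.add (PySem.Set.add p.2 (a - 1)) (a + 1))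
      simp only [hc, if_true] at *
      refine ⟨by rw [ih1]; push_cast; ring, fun z => ?_, fun hn =>
        ih3 (PySem.Set.nodup_add _ _ (PySem.Set.nodup_add _ _ hn))⟩
      rw [ih2 z]
      simp [PySem.Set.mem_add, h, or_assoc]
    · have hc : spl.contains a = false := by
        simpa using (fun hh => h ((PySem.Set.contains_iff _ _).mp hh))
      obtain ⟨ih1, ih2, ih3⟩ := ih (p.1, PySem.Set.add p.2 a)
      simp only [hc, if_false, Bool.false_eq_true] at *
      refine ⟨by simpa using ih1, fun z => ?_, fun hn => ih3 (PySem.Set.nodup_add _ _ hn)⟩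
      rw [ih2 z]
      simp [PySem.Set.mem_add, h, or_assoc]

-- the two per-row hit counts agree when the beam sets have the same members
theorem count_eq (spl : List Int) (hspl : spl.Nodup) (sA sB : PySem.Set Int)
    (hB : sB.Nodup) (hm : ∀ z, z ∈ sA ↔ z ∈ sB) :
    (spl.countP (fun x => sA.contains x))
      = (sB.countP (fun x => (PySem.Set.ofList spl).contains x)) := by
  rw [List.countP_eq_length_filter, List.countP_eq_length_filter]
  refine ((List.perm_ext_iff_of_nodup (hspl.filter _) (hB.filter _)).mpr ?_).length_eq
  intro z
  simp only [List.mem_filter, PySem.Set.contains_iff, PySem.Set.mem_ofList]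
  constructor
  · rintro ⟨hz, hzb⟩; exact ⟨(hm z).mp hzb, hz⟩
  · rintro ⟨hzb, hz⟩; exact ⟨hz, (hm z).mpr hzb⟩

-- the loop invariant: equal totals, beam sets with the same members, both duplicate-free
theorem loop_inv (lines : List String) (ys : List Int) (s t : Int × PySem.Set Int)
    (h1 : s.1 = t.1) (h2 : ∀ z, z ∈ s.2 ↔ z ∈ t.2) (h3 : s.2.Nodup) (h4 : t.2.Nodup) :
    (ys.foldl
      (fun (st : Int × PySem.Set Int) y =>
        let splitter_locations := splitter_list lines y
        let total := splitter_locations.foldl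
          (fun t x => if st.2.contains x then t + 1 else t) st.1
        let cur := beam_tracker splitter_locations st.2
        let cur := st.2.foldl
          (fun c x => if splitter_locations.contains x then c else PySem.Set.add c x) cur
        (total, cur)) s).1
    = (ys.foldl
      (fun (st : Int × PySem.Set Int) y =>
        let splitters : PySem.Set Int :=
          PySem.Set.ofList
            (((PySem.List.enumerate (PySem.List.pyGetD lines y "").toList).filter
                (fun p => p.2 == '^')).map (fun p => p.1))
        st.2.foldl
          (fun (acc : Int × PySem.Set Int) x =>
            if splitters.contains x then
              (acc.1 + 1, PySem.Set.add (PySem.Set.add acc.2 (x - 1)) (x + 1))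
            else (acc.1, PySem.Set.add acc.2 x))
          (st.1, PySem.Set.empty)) t).1 := by
  induction ys generalizing s t with
  | nil => simpa using h1
  | cons y ys ih =>
    simp only [List.foldl_cons]
    set spl := splitter_list lines y with hspl_def
    have hspl_nodup : spl.Nodup := nodup_idx_list _ _
    have hsplmem : ∀ z, z ∈ spl ↔ z ∈ PySem.Set.ofList
        (((PySem.List.enumerate (PySem.List.pyGetD lines y "").toList).filter
            (fun p => p.2 == '^')).map (fun p => p.1)) := by
      intro z
      rw [PySem.Set.mem_ofList]
      rfl
    obtain ⟨hb1, hb2, hb3⟩ := foldlB_spec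
      (PySem.Set.ofList
        (((PySem.List.enumerate (PySem.List.pyGetD lines y "").toList).filter
            (fun p => p.2 == '^')).map (fun p => p.1))) t.2 (t.1, PySem.Set.empty)
    apply ih
    · -- totals stay equal
      dsimp only
      rw [PySem.List.foldl_if_add_one, hb1, h1,
        count_eq spl hspl_nodup s.2 t.2 h4 h2, hspl_def]
      rfl
    · -- beam sets keep the same members
      intro z
      dsimp only
      rw [mem_pass]
      unfold beam_tracker
      rw [mem_fork, hb2 z]
      simp only [PySem.Set.empty, List.not_mem_nil, false_or]
      constructor
      · rintro (⟨x, hx, hxp, hzx⟩ | ⟨hz, hns⟩)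
        · exact ⟨x, (h2 x).mp hxp, Or.inl ⟨(hsplmem x).mp hx, hzx⟩⟩
        · exact ⟨z, (h2 z).mp hz, Or.inr ⟨fun hc => hns ((hsplmem z).mpr hc), rfl⟩⟩
      · rintro ⟨x, hx, ⟨hxs, hzx⟩ | ⟨hxs, hzx⟩⟩
        · exact Or.inl ⟨x, (hsplmem x).mpr hxs, (h2 x).mpr hx, hzx⟩
        · subst hzx
          exact Or.inr ⟨(h2 z).mpr hx, fun hc => hxs ((hsplmem z).mp hc)⟩
    · dsimp only
      exact nodup_pass _ _ _ (nodup_fork _ _ _ List.nodup_nil)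
    · exact hb3 List.nodup_nil

-- ===== VERDICT (by name: the statement is the Claim_ definition above) =====
theorem beam_split_count_spec : Claim_equal_beam_split_count := by
  intro lines _ _
  unfold Spec_beam_split_count beam_split_count beam_split_count_alt
  simp only []
  exact loop_inv lines _ _ _ rfl (fun z => Iff.rfl) (PySem.Set.nodup_ofList _)
    (PySem.Set.nodup_ofList _)
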